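-- pv_equiv track=rewrite | github.com/Klemek/PythonStuff | ez-net/ez-net.py | checkmsk
-- ===== SOURCE A (Python) =====
-- def addtobin(a):
--     '''
--     Returns the binary value of an address
--     input : the address in array
--     example :
--     addtobin([192,168,1,2])='11000000101010000000000100000010'
--     '''
--     return "".join(["{:0>8}".format(bin(i)[2:])for i in a])
--
-- def masknum(m):
--     '''
--     Returns the number of a mask
--     input : the mask in array
--     example :
--     masknum([255, 255, 224, 0]) = 19
--     '''
--     return addtobin(m).count("1")
--
-- def checkmsk(msk, mmin=0, mmax=30):
--     '''
--     Check if a mask is valid or in a range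
--     input : -the string of the mask
--     -(opt) mmin, the minimum mask number
--     -(opt) mmax, the maximum mask number
--     example :
--     checkmsk("255.255.128.0")=True
--     checkadd("255.128.255.0")=False
--     checkadd("/25")=True
--     checkadd("/31")=False
--     checkadd("2")=True
--     checkadd("-1")=False
--     checkadd("25",mmax=22)=False
--     checkadd("255.128.0.0",mmin=12)=False
--     '''
--     try:
--         if "." in msk:
--             m = []
--             for smsk in msk.split("."):
--                 if not 0 <= int(smsk) < 256:
--                     return False
--                 else:
--                     m += [int(smsk)]
--             bm = addtobin(m)
--             f0 = False
--             for i in bm: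
--                 if f0 and i == '1':
--                     return False
--                 if i == '0':
--                     f0 = True
--             if not mmin <= masknum(m) <= mmax:
--                 return False
--         else:
--             n = int(msk.replace("/", ""))
--             if not mmin <= n <= mmax:
--                 return False
--     except ValueError:
--         return False
--     return True
-- ===== SOURCE B (Python) =====
-- _OCTETS = {0: 0, 128: 1, 192: 2, 224: 3, 240: 4, 248: 5, 252: 6, 254: 7, 255: 8}
--
-- def checkmsk(msk, mmin=0, mmax=30):
--     if "." in msk:
--         try:
--             parts = [int(p) for p in msk.split(".")]
--         except ValueError:
--             return False
--         if any(not 0 <= p < 256 for p in parts):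
--             return False
--         bits = 0
--         seen_zero = False
--         for p in parts:
--             if p not in _OCTETS or (seen_zero and p != 0):
--                 return False
--             bits += _OCTETS[p]
--             seen_zero = seen_zero or p != 255
--         return mmin <= bits <= mmax
--     try:
--         n = int(msk.replace("/", ""))
--     except ValueError:
--         return False
--     return mmin <= n <= mmax
-- ===== Notes on version B (the rewrite author's own statement) =====
-- stated objective: simpler
-- what changed: The dotted branch no longer builds a padded binary string, scans it char-by-char with a flag for a one-bit after a zero-bit, and recounts set bits over a second string build: B folds over the parsed octets once with a table of the nine valid mask octets and their bit counts, a seen-zero flag and a running bit total; the CIDR branch is kept as is.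
import Mathlib
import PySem

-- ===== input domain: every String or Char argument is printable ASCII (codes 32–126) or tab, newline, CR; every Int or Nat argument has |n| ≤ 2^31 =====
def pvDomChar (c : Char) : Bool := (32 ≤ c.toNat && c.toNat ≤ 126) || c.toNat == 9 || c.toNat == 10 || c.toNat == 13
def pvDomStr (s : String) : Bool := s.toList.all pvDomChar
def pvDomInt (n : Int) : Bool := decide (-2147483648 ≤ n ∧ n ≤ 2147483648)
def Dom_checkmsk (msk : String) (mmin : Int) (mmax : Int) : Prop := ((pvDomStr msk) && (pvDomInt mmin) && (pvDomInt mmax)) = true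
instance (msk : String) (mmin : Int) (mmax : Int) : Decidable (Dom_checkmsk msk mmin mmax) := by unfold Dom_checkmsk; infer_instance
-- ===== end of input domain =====

-- B replaces A's binary-string build-and-scan with a per-octet table of the nine
-- valid mask octets plus a seen-zero flag and a running bit count (objective: simpler).

-- ===== PORT A =====

-- digits of bin(n) (MSB first, [] for 0); the fuel argument (n+1 at every call)
-- only makes Python's halving loop structural — it never changes the value
def pvBinDigits : Nat → Nat → List Char
  | 0, _ => []
  | fuel+1, n => if n = 0 then [] else pvBinDigits fuel (n / 2) ++ [if n % 2 = 1 then '1' else '0']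

-- Python bin(i)
def pvBin (i : Int) : List Char :=
  if i < 0 then '-' :: '0' :: 'b' :: (if i = 0 then ['0'] else pvBinDigits ((-i).toNat + 1) (-i).toNat)
  else '0' :: 'b' :: (if i = 0 then ['0'] else pvBinDigits (i.toNat + 1) i.toNat)

-- "{:0>8}".format(s)
def pvPad8 (s : List Char) : List Char := List.replicate (8 - s.length) '0' ++ s

-- addtobin(a) = "".join("{:0>8}".format(bin(i)[2:]) for i in a)
def addtobin (a : List Int) : List Char :=
  PySem.Chars.join [] (a.map (fun i => pvPad8 ((pvBin i).drop 2)))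

-- masknum(m) = addtobin(m).count("1")
def masknumA (m : List Int) : Nat := PySem.Chars.count (addtobin m) ['1']

-- A's parsing loop; none = 'return False' (out-of-range octet) or the ValueError
-- that the surrounding try/except turns into False
def pvParseA : List (List Char) → List Int → Option (List Int)
  | [], m => some m
  | s :: rest, m =>
    match PySem.Int.ofChars? s with
    | none => none
    | some x => if !(decide (0 ≤ x) && decide (x < 256)) then none else pvParseA rest (m ++ [x])

-- A's scan over the binary string with the f0 flag; false = 'return False'
def pvScanA : List Char → Bool → Bool
  | [], _ => true
  | c :: rest, f0 => if f0 && (c == '1') then false else pvScanA rest (f0 || (c == '0'))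

def checkmsk (msk : String) (mmin : Int) (mmax : Int) : Bool :=
  if PySem.Chars.isIn ['.'] msk.toList then
    match pvParseA (PySem.Chars.splitOn msk.toList ['.']) [] with
    | none => false
    | some m =>
      if !pvScanA (addtobin m) false then false
      else if !(decide (mmin ≤ (masknumA m : Int)) && decide ((masknumA m : Int) ≤ mmax)) then false
      else true
  else
    match PySem.Int.ofChars? (PySem.Chars.replace msk.toList ['/'] []) with
    | none => false
    | some n => if !(decide (mmin ≤ n) && decide (n ≤ mmax)) then false else true

-- ===== PORT B =====

-- _OCTETS: the nine octet values a contiguous mask can contain, with their bit counts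
def pvOctets : PySem.Dict Int Int :=
  ⟨[(0, 0), (128, 1), (192, 2), (224, 3), (240, 4), (248, 5), (252, 6), (254, 7), (255, 8)]⟩

-- B's for-loop: bits and seen_zero accumulators, early False inside
def pvLoopB (mmin mmax : Int) : List Int → Int → Bool → Bool
  | [], bits, _ => decide (mmin ≤ bits) && decide (bits ≤ mmax)
  | p :: rest, bits, seenZero =>
    match PySem.Dict.get? pvOctets p with
    | none => false
    | some v =>
      if seenZero && !(p == 0) then false
      else pvLoopB mmin mmax rest (bits + v) (seenZero || !(p == 255))

def checkmsk_alt (msk : String) (mmin : Int) (mmax : Int) : Bool :=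
  if PySem.Chars.isIn ['.'] msk.toList then
    match (PySem.Chars.splitOn msk.toList ['.']).mapM PySem.Int.ofChars? with
    | none => false
    | some parts =>
      if parts.any (fun p => !(decide (0 ≤ p) && decide (p < 256))) then false
      else pvLoopB mmin mmax parts 0 false
  else
    match PySem.Int.ofChars? (PySem.Chars.replace msk.toList ['/'] []) with
    | none => false
    | some n => decide (mmin ≤ n) && decide (n ≤ mmax)

-- ===== PRECONDITION & SPEC =====
def Spec_checkmsk (msk : String) (mmin : Int) (mmax : Int) (out : Bool) : Prop := out = checkmsk_alt msk mmin mmax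
instance (msk : String) (mmin : Int) (mmax : Int) (out : Bool) : Decidable (Spec_checkmsk msk mmin mmax out) := by unfold Spec_checkmsk; infer_instance

-- ===== CLAIM (what is proved, stated in full; the proofs are below) =====
def Claim_equal_checkmsk : Prop := ∀ (msk : String) (mmin : Int) (mmax : Int), Dom_checkmsk msk mmin mmax → Spec_checkmsk msk mmin mmax (checkmsk msk mmin mmax)

-- ===== LEMMAS AND PROOFS =====

-- A's flag scan with the final flag made explicit (none = A returned False)
def pvScanF : List Char → Bool → Option Bool
  | [], f => some f
  | c :: rest, f => if f && (c == '1') then none else pvScanF rest (f || (c == '0'))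

theorem pvScanA_eq (s : List Char) : ∀ f, pvScanA s f = (pvScanF s f).isSome := by
  induction s with
  | nil => intro f; rfl
  | cons c rest ih =>
    intro f
    simp only [pvScanA, pvScanF]
    by_cases h : (f && (c == '1')) = true <;> simp [h, ih]

theorem pvScanF_append (a b : List Char) : ∀ f, pvScanF (a ++ b) f = (pvScanF a f).bind (pvScanF b) := by
  induction a with
  | nil => intro f; rfl
  | cons c rest ih =>
    intro f
    simp only [List.cons_append, pvScanF]
    by_cases h : (f && (c == '1')) = true <;> simp [h, ih]

theorem count_go_single (s : List Char) (c : Char) : ∀ (acc fuel : Nat), s.length ≤ fuel →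
    PySem.Chars.count.go [c] fuel s acc = acc + s.count c := by
  induction s with
  | nil => intro acc fuel h; cases fuel <;> simp [PySem.Chars.count.go]
  | cons a t ih =>
    intro acc fuel h
    cases fuel with
    | zero => simp at h
    | succ f =>
      have hf : t.length ≤ f := by simp at h; omega
      simp only [PySem.Chars.count.go]
      by_cases hc : [c].isPrefixOf (a :: t) = true
      · have hca : c = a := by simpa [List.isPrefixOf] using hc
        subst hca
        simp only [hc, if_pos, List.length_cons, List.length_nil, List.drop_succ_cons,
          List.drop_zero]
        rw [ih _ _ hf]
        simp
        omega
      · have hca : ¬ (c = a) := by simpa [List.isPrefixOf] using hc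
        simp only [hc, Bool.false_eq_true, if_false]
        rw [ih _ _ hf]
        have hac : ¬ (a = c) := fun hh => hca hh.symm
        simp [hac]

theorem count_single (s : List Char) (c : Char) : PySem.Chars.count s [c] = s.count c := by
  simpa [PySem.Chars.count] using count_go_single s c 0 s.length le_rfl

theorem join_nil_flatten (l : List (List Char)) : PySem.Chars.join [] l = l.flatten := by
  induction l with
  | nil => rfl
  | cons a t ih =>
    cases t with
    | nil => simp [PySem.Chars.join, List.intercalate]
    | cons b t' =>
      simp only [PySem.Chars.join, List.intercalate, List.intersperse] at *
      simp_all

theorem addtobin_cons (x : Int) (rest : List Int) :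
    addtobin (x :: rest) = pvPad8 ((pvBin x).drop 2) ++ addtobin rest := by
  simp [addtobin, join_nil_flatten]

theorem masknumA_cons (x : Int) (rest : List Int) :
    masknumA (x :: rest) = (pvPad8 ((pvBin x).drop 2)).count '1' + masknumA rest := by
  simp [masknumA, addtobin_cons, count_single, List.count_append]

set_option maxRecDepth 8192 in
-- per-octet step: scanning one padded octet = B's table test, by exhaustion over 0..255
theorem octet_step : ∀ (n : Fin 256) (f : Bool),
    pvScanF (pvPad8 ((pvBin (n : Int)).drop 2)) f =
      (PySem.Dict.get? pvOctets (n : Int)).bind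
        (fun _ => if f && !((n : Int) == 0) then none else some (f || !((n : Int) == 255))) := by
  decide

set_option maxRecDepth 8192 in
-- per-octet bit count = the table value, by exhaustion over 0..255
theorem octet_count : ∀ (n : Fin 256),
    (PySem.Dict.get? pvOctets (n : Int)).all
      (fun v => ((pvPad8 ((pvBin (n : Int)).drop 2)).count '1' : Int) == v) = true := by
  decide

theorem parse_eq (parts : List (List Char)) : ∀ acc, pvParseA parts acc =
    (parts.mapM PySem.Int.ofChars?).bind
      (fun xs => if xs.any (fun p => !(decide (0 ≤ p) && decide (p < 256))) then none else some (acc ++ xs)) := by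
  induction parts with
  | nil => intro acc; simp [pvParseA]
  | cons s rest ih =>
    intro acc
    simp only [pvParseA, List.mapM_cons]
    cases h : PySem.Int.ofChars? s with
    | none => simp
    | some x =>
      by_cases hx : (!(decide (0 ≤ x) && decide (x < 256))) = true
      · simp only [hx, if_pos]
        cases hr : rest.mapM PySem.Int.ofChars? with
        | none => simp
        | some xs =>
          have hxp : x < 0 ∨ 256 ≤ x := by revert hx; simp
          simp [hxp]
      · simp only [hx, Bool.false_eq_true, if_false, ih]
        have hxp : ¬ (x < 0 ∨ 256 ≤ x) := by revert hx; simp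
        cases hr : rest.mapM PySem.Int.ofChars? with
        | none => simp
        | some xs => simp [hxp, List.append_assoc]

theorem loop_eq (mmin mmax : Int) (m : List Int) (hm : ∀ x ∈ m, 0 ≤ x ∧ x < 256) :
    ∀ (f : Bool) (bits : Int),
    (if pvScanA (addtobin m) f then
       (decide (mmin ≤ bits + (masknumA m : Int)) && decide (bits + (masknumA m : Int) ≤ mmax))
     else false) = pvLoopB mmin mmax m bits f := by
  induction m with
  | nil =>
    intro f bits
    have h1 : addtobin [] = [] := rfl
    have h2 : masknumA [] = 0 := rfl
    rw [h1, h2]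
    simp [pvScanA, pvLoopB]
  | cons x rest ih =>
    intro f bits
    obtain ⟨hx0, hx256⟩ := hm x (List.mem_cons_self)
    have hrest : ∀ y ∈ rest, 0 ≤ y ∧ y < 256 := fun y hy => hm y (List.mem_cons_of_mem _ hy)
    have hn : ((⟨x.toNat, by omega⟩ : Fin 256) : Int) = x := by simp; omega
    have hstep := octet_step ⟨x.toNat, by omega⟩ f
    have hcntA := octet_count ⟨x.toNat, by omega⟩
    rw [hn] at hstep hcntA
    rw [addtobin_cons, pvScanA_eq, pvScanF_append, hstep, masknumA_cons, pvLoopB]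
    cases hg : PySem.Dict.get? pvOctets x with
    | none => simp
    | some v =>
      rw [hg] at hcntA
      have hcnt : ((pvPad8 ((pvBin x).drop 2)).count '1' : Int) = v := by
        simpa using hcntA
      simp only [Option.bind_some]
      by_cases hf : (f && !(x == 0)) = true
      · simp [hf]
      · simp only [hf, Bool.false_eq_true, if_false, Option.bind_some]
        rw [← pvScanA_eq]
        have hih := ih hrest (f || !(x == 255)) (bits + v)
        rw [← hih]
        have harith : bits + (((pvPad8 ((pvBin x).drop 2)).count '1' + masknumA rest : Nat) : Int)
            = bits + v + (masknumA rest : Int) := by push_cast; rw [← hcnt]; ring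
        rw [harith]

-- ===== VERDICT (by name: the statement is the Claim_ definition above) =====
theorem bool_triple_if (s c : Bool) :
    (if (!s) = true then false else if (!c) = true then false else true) =
      (if s = true then c else false) := by
  cases s <;> cases c <;> rfl

theorem bool_double_if (c : Bool) : (if (!c) = true then false else true) = c := by
  cases c <;> rfl

theorem checkmsk_spec : Claim_equal_checkmsk := by
  unfold Claim_equal_checkmsk
  intro msk mmin mmax _
  unfold Spec_checkmsk checkmsk checkmsk_alt
  by_cases hdot : PySem.Chars.isIn ['.'] msk.toList = true
  · rw [if_pos hdot, if_pos hdot, parse_eq]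
    cases hm : (PySem.Chars.splitOn msk.toList ['.']).mapM PySem.Int.ofChars? with
    | none => rfl
    | some parts =>
      simp only [Option.bind_some]
      by_cases hbad : parts.any (fun p => !(decide (0 ≤ p) && decide (p < 256))) = true
      · rw [if_pos hbad, if_pos hbad]
      · have hb : parts.any (fun p => !(decide (0 ≤ p) && decide (p < 256))) = false := by
          simpa using hbad
        have hrange : ∀ x ∈ parts, 0 ≤ x ∧ x < 256 := by
          intro x hx
          have := List.any_eq_false.mp hb x hx
          revert this; simp
        have hloop := loop_eq mmin mmax parts hrange false 0
        simp only [zero_add] at hloop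
        simp only [hb, Bool.false_eq_true, if_false, List.nil_append]
        rw [bool_triple_if, hloop]
  · rw [if_neg hdot, if_neg hdot]
    cases hn : PySem.Int.ofChars? (PySem.Chars.replace msk.toList ['/'] []) with
    | none => rfl
    | some n => simp only [bool_double_if]
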